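-- pv_equiv track=rewrite | github.com/noait2612/university | Year 3/Introduction To Computer Science/Assignments/Ex11/diff_iter.py | diff_iter
-- ===== SOURCE A (Python) =====
-- def diff_iter(some_iter):
--     iterator = iter(some_iter)
--     try:
--         previous = next(iterator)
--     except StopIteration:
--         return
--
--     for current in iterator:
--         yield current - previous
--         previous = current
-- ===== SOURCE B (Python) =====
-- def diff_iter(some_iter):
--     lst = list(some_iter)
--     yield from (b - a for a, b in zip(lst, lst[1:]))
-- ===== Notes on version B (the rewrite author's own statement) =====
-- stated objective: idiomatic
-- what changed: B materializes the iterable into a list and yields differences by zipping the list with its own tail, replacing A's explicit next()/previous running-state loop with adjacent-pair windowing.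
import Mathlib
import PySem

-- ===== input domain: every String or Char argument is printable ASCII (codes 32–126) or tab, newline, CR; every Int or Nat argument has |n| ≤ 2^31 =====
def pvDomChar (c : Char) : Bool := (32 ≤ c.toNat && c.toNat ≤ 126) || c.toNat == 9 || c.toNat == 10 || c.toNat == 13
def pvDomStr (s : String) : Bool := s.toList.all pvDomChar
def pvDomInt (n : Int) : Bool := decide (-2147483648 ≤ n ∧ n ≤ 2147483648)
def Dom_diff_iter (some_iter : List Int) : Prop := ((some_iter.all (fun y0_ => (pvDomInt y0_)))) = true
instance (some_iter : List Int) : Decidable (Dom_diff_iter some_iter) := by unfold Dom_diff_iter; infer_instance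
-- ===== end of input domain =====

-- B replaces A's running-previous iterator loop with list materialization and adjacent-pair zip windowing (idiomatic; return values proved equal).


-- ===== PORT A =====
-- A: running `previous` state loop over the iterator
def diff_iterLoop (previous : Int) (rest : List Int) : List Int :=
  match rest with
  | [] => []
  | current :: rest' => (current - previous) :: diff_iterLoop current rest'

def diff_iter (some_iter : List Int) : List Int :=
  match some_iter with
  | [] => []
  | previous :: rest => diff_iterLoop previous rest

-- ===== PORT B =====
-- B: zip the list with its tail (lst[1:]) and map the subtraction
def diff_iter_alt (some_iter : List Int) : List Int :=
  (some_iter.zip (PySem.List.slice some_iter (some 1) none)).map (fun p => p.2 - p.1)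

-- ===== PRECONDITION & SPEC =====
def Spec_diff_iter (some_iter : List Int) (out : List Int) : Prop := out = diff_iter_alt some_iter
instance (some_iter : List Int) (out : List Int) : Decidable (Spec_diff_iter some_iter out) := by unfold Spec_diff_iter; infer_instance

-- ===== CLAIM (what is proved, stated in full; the proofs are below) =====
def Claim_equal_diff_iter : Prop := ∀ (some_iter : List Int), Dom_diff_iter some_iter → Spec_diff_iter some_iter (diff_iter some_iter)

-- ===== LEMMAS AND PROOFS =====

-- ===== VERDICT (by name: the statement is the Claim_ definition above) =====
theorem diff_iterLoop_eq (previous : Int) (rest : List Int) :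
    diff_iterLoop previous rest
      = ((previous :: rest).zip rest).map (fun p => p.2 - p.1) := by
  induction rest generalizing previous with
  | nil => rfl
  | cons c r ih => simp [diff_iterLoop, ih c]

theorem diff_iter_spec : Claim_equal_diff_iter := by
  intro some_iter _
  unfold Spec_diff_iter diff_iter_alt
  rw [PySem.List.slice_from_one]
  cases some_iter with
  | nil => rfl
  | cons p rest =>
    show diff_iterLoop p rest = _
    rw [diff_iterLoop_eq]
    rfl
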